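-- pv_equiv track=rewrite | github.com/ivanillera/TP1Sintaxis | Lexer.py | a_guion
-- ===== SOURCE A (Python) =====
-- TRAMPA = -1
--
-- RESULTADO_ACEPTADO = "ACEPTADO"
--
-- RESULTADO_TRAMPA = "TRAMPA"
--
-- RESULTADO_NO_ACEPTADO = "NO_ACEPTADO"
--
-- def d_guion(estado_anterior, caracter):
-- 	if estado_anterior == 0 and caracter == "-":
-- 		return 1
--
--
-- 	return RESULTADO_TRAMPA
--
-- def a_guion(cadena):
-- 	Finales = [1]
-- 	estado_actual = 0
--
-- 	for caracter in cadena: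
-- 		estado_proximo = d_guion(estado_actual, caracter)
-- 		if estado_proximo == TRAMPA:
-- 			return RESULTADO_TRAMPA
-- 		estado_actual = estado_proximo
--
-- 	if estado_actual in Finales:
-- 		return RESULTADO_ACEPTADO
-- 	else:
-- 		return RESULTADO_NO_ACEPTADO
-- ===== SOURCE B (Python) =====
-- TRAMPA = -1
-- RESULTADO_ACEPTADO = "ACEPTADO"
-- RESULTADO_TRAMPA = "TRAMPA"
-- RESULTADO_NO_ACEPTADO = "NO_ACEPTADO"
--
-- def a_guion(cadena):
--     # The DFA accepts exactly the one-character string "-"; the TRAMPA branch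
--     # is dead (the string "TRAMPA" is never equal to the int -1).
--     return RESULTADO_ACEPTADO if cadena == "-" else RESULTADO_NO_ACEPTADO
-- ===== Notes on version B (the rewrite author's own statement) =====
-- stated objective: simpler
-- what changed: Replaced the per-character DFA state loop (whose trap branch is dead because the string 'TRAMPA' is compared against the int -1, so the loop always runs over the whole string) by a closed-form single string-equality test.
import Mathlib
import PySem

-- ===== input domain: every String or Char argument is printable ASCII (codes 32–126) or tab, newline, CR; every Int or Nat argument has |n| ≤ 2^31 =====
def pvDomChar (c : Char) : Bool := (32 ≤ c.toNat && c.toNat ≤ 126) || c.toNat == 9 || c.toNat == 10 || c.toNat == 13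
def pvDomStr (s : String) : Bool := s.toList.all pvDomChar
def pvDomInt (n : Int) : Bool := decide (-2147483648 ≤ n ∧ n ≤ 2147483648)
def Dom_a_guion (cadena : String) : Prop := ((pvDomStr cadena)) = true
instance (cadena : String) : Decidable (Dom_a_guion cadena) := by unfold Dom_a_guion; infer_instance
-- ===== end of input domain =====

-- B replaces A's DFA loop by the closed form `cadena == "-"`; return values are proved equal
-- (A's TRAMPA return is dead code: the string "TRAMPA" never equals the int -1).

-- ===== PORT A =====
-- A's state variable holds either an int (0 or 1) or the string "TRAMPA"
-- (d_guion's fall-through returns RESULTADO_TRAMPA, a string); modelled as Int ⊕ String.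
def d_guion (estado_anterior : Int ⊕ String) (caracter : Char) : Int ⊕ String :=
  if estado_anterior = Sum.inl 0 ∧ caracter = '-' then Sum.inl 1
  else Sum.inr "TRAMPA"

-- the for-loop with its early return
def a_guion_loop (estado_actual : Int ⊕ String) : List Char → String
  | [] => if estado_actual = Sum.inl 1 then "ACEPTADO" else "NO_ACEPTADO"
  | c :: cs =>
    let estado_proximo := d_guion estado_actual c
    -- Python: `if estado_proximo == TRAMPA` compares against the int -1
    if estado_proximo = Sum.inl (-1) then "TRAMPA"
    else a_guion_loop estado_proximo cs

def a_guion (cadena : String) : String :=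
  a_guion_loop (Sum.inl 0) cadena.toList

-- ===== PORT B =====
def a_guion_alt (cadena : String) : String :=
  if cadena = "-" then "ACEPTADO" else "NO_ACEPTADO"

-- ===== PRECONDITION & SPEC =====
def Spec_a_guion (cadena : String) (out : String) : Prop := out = a_guion_alt cadena
instance (cadena : String) (out : String) : Decidable (Spec_a_guion cadena out) := by unfold Spec_a_guion; infer_instance

-- ===== CLAIM (what is proved, stated in full; the proofs are below) =====
def Claim_equal_a_guion : Prop := ∀ (cadena : String), Dom_a_guion cadena → Spec_a_guion cadena (a_guion cadena)

-- ===== LEMMAS AND PROOFS =====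

-- once in the trap state (a string), the loop can only end in NO_ACEPTADO
theorem a_guion_loop_trap (s : String) (l : List Char) :
    a_guion_loop (Sum.inr s) l = "NO_ACEPTADO" := by
  induction l generalizing s with
  | nil => simp [a_guion_loop]
  | cons c cs ih => simp [a_guion_loop, d_guion, ih]

theorem a_guion_loop_closed (l : List Char) :
    a_guion_loop (Sum.inl 0) l = if l = ['-'] then "ACEPTADO" else "NO_ACEPTADO" := by
  match l with
  | [] => simp [a_guion_loop]
  | c :: cs =>
    by_cases hc : c = '-'
    · subst hc
      match cs with
      | [] => simp [a_guion_loop, d_guion]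
      | c' :: cs' =>
        simp only [a_guion_loop, d_guion]
        simp [a_guion_loop_trap]
    · simp only [a_guion_loop, d_guion]
      simp [hc, a_guion_loop_trap]

theorem toList_eq_dash (s : String) : s.toList = ['-'] ↔ s = "-" := by
  constructor
  · intro h
    have := congrArg String.ofList h
    simpa using this
  · intro h; subst h; rfl

-- ===== VERDICT (by name: the statement is the Claim_ definition above) =====
theorem a_guion_spec : Claim_equal_a_guion := by
  intro cadena _
  unfold Spec_a_guion a_guion a_guion_alt
  rw [a_guion_loop_closed]
  simp [toList_eq_dash]
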